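-- pv_equiv track=rewrite | github.com/derek-perdomo/ggsolver | ggsolver/logic/scltl.py | scltl_eventually
-- ===== SOURCE A (Python) =====
-- def scltl_eventually(args):
--     """Parse ScLTL Eventually."""
--     if len(args) == 1:
--         return str(args[0])
--     else:
--         f = str(args[-1])
--         for _ in args[:-1]:
--             f = f"F({f})"
--         return f
-- ===== SOURCE B (Python) =====
-- def scltl_eventually(args):
--     """Parse ScLTL Eventually."""
--     k = len(args) - 1
--     return "F(" * k + str(args[-1]) + ")" * k
-- ===== Notes on version B (the rewrite author's own statement) =====
-- stated objective: faster
-- what changed: Replaces the length-1 branch plus per-element wrapping loop with one closed-form expression 'F('*(len-1) + str(args[-1]) + ')'*(len-1) built by string repetition.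
import Mathlib
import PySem

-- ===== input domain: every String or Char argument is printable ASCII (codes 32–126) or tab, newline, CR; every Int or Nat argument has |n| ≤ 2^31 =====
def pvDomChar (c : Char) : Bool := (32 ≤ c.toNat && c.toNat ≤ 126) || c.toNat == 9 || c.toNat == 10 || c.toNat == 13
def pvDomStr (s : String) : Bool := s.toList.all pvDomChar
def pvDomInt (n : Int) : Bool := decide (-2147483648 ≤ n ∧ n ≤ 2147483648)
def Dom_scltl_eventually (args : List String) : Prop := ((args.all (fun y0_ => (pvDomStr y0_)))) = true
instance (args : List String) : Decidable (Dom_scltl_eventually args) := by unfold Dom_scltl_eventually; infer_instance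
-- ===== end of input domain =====

-- one honest line: B replaces A's length-1 branch and wrapping loop by the closed form "F("*k ++ last ++ ")"*k (simpler)

-- ===== PORT A =====
def scltl_eventually (args : List String) : String :=
  if args.length == 1 then
    PySem.List.pyGetD args 0 ""
  else
    let f := PySem.List.pyGetD args (-1) ""
    (PySem.List.slice args none (some (-1))).foldl (fun f _ => "F(" ++ f ++ ")") f

-- ===== PORT B =====
def scltl_eventually_alt (args : List String) : String :=
  let k : Int := (args.length : Int) - 1
  String.ofList (PySem.List.pyRepeat "F(".toList k) ++ PySem.List.pyGetD args (-1) ""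
    ++ String.ofList (PySem.List.pyRepeat ")".toList k)

-- ===== PRECONDITION & SPEC =====
-- Pre_ excludes only the empty list, on which Python A raises IndexError (args[-1]).
def Pre_scltl_eventually (args : List String) : Prop := args ≠ []
instance (args : List String) : Decidable (Pre_scltl_eventually args) := by unfold Pre_scltl_eventually; infer_instance
def pvWitness_scltl_eventually : List String := ["a", "b"]

def Spec_scltl_eventually (args : List String) (out : String) : Prop := out = scltl_eventually_alt args
instance (args : List String) (out : String) : Decidable (Spec_scltl_eventually args out) := by unfold Spec_scltl_eventually; infer_instance

-- ===== CLAIM (what is proved, stated in full; the proofs are below) =====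
def Claim_equal_scltl_eventually : Prop := ∀ (args : List String), Dom_scltl_eventually args → Pre_scltl_eventually args → Spec_scltl_eventually args (scltl_eventually args)

-- ===== LEMMAS AND PROOFS =====
theorem pv_string_ext (s t : String) (h : s.toList = t.toList) : s = t := by
  have := congrArg String.ofList h; simpa using this

theorem pv_pyRepeat_natCast (xs : List Char) (n : Nat) :
    PySem.List.pyRepeat xs (n : Int) = (List.replicate n xs).flatten := by
  simp [PySem.List.pyRepeat]

theorem pv_flatten_replicate_comm (n : Nat) (xs r : List Char) :
    (List.replicate n xs).flatten ++ (xs ++ r) = xs ++ ((List.replicate n xs).flatten ++ r) := by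
  induction n with
  | zero => simp
  | succ n ih => simp [List.replicate_succ, List.append_assoc, ih]

theorem pv_foldl_wrap (l : List String) (f : String) :
    (l.foldl (fun f _ => "F(" ++ f ++ ")") f).toList
      = (List.replicate l.length "F(".toList).flatten ++ f.toList
        ++ (List.replicate l.length ")".toList).flatten := by
  induction l generalizing f with
  | nil => simp
  | cons x t ih =>
      simp only [List.foldl_cons, ih, List.length_cons, List.replicate_succ,
        List.flatten_cons, String.toList_append]
      simpa using pv_flatten_replicate_comm t.length "F(".toList
        (f.toList ++ ')' :: List.replicate t.length ')')

-- ===== VERDICT (by name: the statement is the Claim_ definition above) =====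
theorem scltl_eventually_spec : Claim_equal_scltl_eventually := by
  intro args _ hpre
  unfold Spec_scltl_eventually scltl_eventually scltl_eventually_alt
  apply pv_string_ext
  by_cases h1 : args.length = 1
  · -- single element
    obtain ⟨a, rfl⟩ : ∃ a, args = [a] := by
      match args, h1 with
      | [a], _ => exact ⟨a, rfl⟩
    simp [PySem.List.pyGetD, PySem.List.pyGet?, PySem.List.pyIdx?,
      PySem.List.pyRepeat]
  · have hlen : 1 ≤ args.length := by
      cases args with
      | nil => exact absurd rfl hpre
      | cons a t => simp
    have hcast : (args.length : Int) - 1 = ((args.length - 1 : Nat) : Int) := by omega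
    simp only [h1, beq_iff_eq, if_false, hcast, pv_pyRepeat_natCast,
      PySem.List.slice_to_neg_one]
    rw [pv_foldl_wrap]
    simp [List.length_dropLast]
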